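-- pv_equiv track=rewrite | github.com/ProntoPublishing/pronto-worker-2-interior | lib/blocks_to_latex.py | _wrap_with_marks
-- ===== SOURCE A (Python) =====
-- from typing import Any, Dict, List, Optional
--
-- def _wrap_with_marks(escaped_text: str, marks: List[str]) -> str:
--     """Wrap escaped text with the per-span marks. Marks not in the
--     canonical vocabulary are dropped silently (the v1 reader already
--     normalizes what it carries through; W1 v5.0 producer emits only
--     canonical marks).
--
--     Doc 23 R-4.2 — `underline` and `strikethrough` marks are stripped
--     in v1 (the underlying span text is preserved, the mark is
--     not rendered). Underline in print fiction is dated; strikethrough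
--     is rare and usually accidental from track-changes leakage. Both
--     are no-ops here.
--     """
--     if not marks:
--         return escaped_text
--     wrapped = escaped_text
--     for mark in marks:
--         if mark == "italic":
--             wrapped = f"\\textit{{{wrapped}}}"
--         elif mark == "bold":
--             wrapped = f"\\textbf{{{wrapped}}}"
--         elif mark == "small_caps":
--             wrapped = f"\\textsc{{{wrapped}}}"
--         elif mark == "code":
--             wrapped = f"\\texttt{{{wrapped}}}"
--         elif mark == "underline":
--             # R-4.2: stripped in v1 — text passes through unmarked.
--             pass
--         elif mark == "strikethrough":
--             # R-4.2: stripped in v1 — text passes through unmarked.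
--             pass
--         elif mark == "superscript":
--             wrapped = f"\\textsuperscript{{{wrapped}}}"
--         elif mark == "subscript":
--             wrapped = f"\\textsubscript{{{wrapped}}}"
--         # else: unknown mark, drop silently.
--     return wrapped
-- ===== SOURCE B (Python) =====
-- from typing import List
--
-- _CMDS = {
--     "italic": "\\textit",
--     "bold": "\\textbf",
--     "small_caps": "\\textsc",
--     "code": "\\texttt",
--     "superscript": "\\textsuperscript",
--     "subscript": "\\textsubscript",
-- }
--
-- def _wrap_with_marks(escaped_text: str, marks: List[str]) -> str:
--     """Gather-then-assemble: collect the opening command for each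
--     renderable mark (underline/strikethrough/unknown marks have no
--     entry and are dropped), then build the result in one shot."""
--     prefixes = []
--     for mark in marks:
--         cmd = _CMDS.get(mark)
--         if cmd is not None:
--             prefixes.append(cmd + "{")
--     return "".join(reversed(prefixes)) + escaped_text + "}" * len(prefixes)
-- ===== Notes on version B (the rewrite author's own statement) =====
-- stated objective: alternative
-- what changed: Replaces the iterative nested re-wrapping (rebuilding the string per mark) with a gather-then-assemble decomposition: a table lookup collects each renderable mark's opening prefix, then the result is built once as join(reversed(prefixes)) + text + '}'*n.
import Mathlib
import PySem

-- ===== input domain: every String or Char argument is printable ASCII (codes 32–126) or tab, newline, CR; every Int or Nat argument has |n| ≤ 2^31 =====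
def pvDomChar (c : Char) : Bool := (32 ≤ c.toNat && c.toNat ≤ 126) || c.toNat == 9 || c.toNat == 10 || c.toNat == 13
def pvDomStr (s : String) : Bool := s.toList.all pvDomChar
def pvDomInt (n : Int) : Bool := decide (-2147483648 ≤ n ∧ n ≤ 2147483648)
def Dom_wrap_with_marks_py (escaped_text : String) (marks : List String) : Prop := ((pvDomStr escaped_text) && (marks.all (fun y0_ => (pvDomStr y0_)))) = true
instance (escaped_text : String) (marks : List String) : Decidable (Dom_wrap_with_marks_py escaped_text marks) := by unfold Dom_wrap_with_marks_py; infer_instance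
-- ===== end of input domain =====

-- B replaces A's iterative nested re-wrapping with a gather-then-assemble decomposition
-- (collect opening prefixes via a table, then one join + text + repeated closing braces); same cost, alternative structure.
-- String concatenation is ported over List Char (String.toList / String.ofList), which is exact.

-- ===== PORT A =====
-- one loop iteration of A: wrap `wrapped` according to `mark`, in A's branch order
def pvStepA (wrapped : List Char) (mark : String) : List Char :=
  if mark = "italic" then "\\textit{".toList ++ wrapped ++ "}".toList
  else if mark = "bold" then "\\textbf{".toList ++ wrapped ++ "}".toList
  else if mark = "small_caps" then "\\textsc{".toList ++ wrapped ++ "}".toList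
  else if mark = "code" then "\\texttt{".toList ++ wrapped ++ "}".toList
  else if mark = "underline" then wrapped
  else if mark = "strikethrough" then wrapped
  else if mark = "superscript" then "\\textsuperscript{".toList ++ wrapped ++ "}".toList
  else if mark = "subscript" then "\\textsubscript{".toList ++ wrapped ++ "}".toList
  else wrapped

def wrap_with_marks_py (escaped_text : String) (marks : List String) : String :=
  if marks = [] then escaped_text
  else String.ofList (marks.foldl pvStepA escaped_text.toList)

-- ===== PORT B =====
-- the mark → LaTeX-command table (underline/strikethrough/unknown absent)
def pvMarkCmds : List (String × List Char) :=
  [("italic", "\\textit".toList), ("bold", "\\textbf".toList),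
   ("small_caps", "\\textsc".toList), ("code", "\\texttt".toList),
   ("superscript", "\\textsuperscript".toList), ("subscript", "\\textsubscript".toList)]

-- prefixes collected by B's first loop: cmd + "{" for each renderable mark
def pvPrefixes (marks : List String) : List (List Char) :=
  marks.filterMap (fun m => (pvMarkCmds.lookup m).map (fun c => c ++ "{".toList))

def wrap_with_marks_py_alt (escaped_text : String) (marks : List String) : String :=
  let prefixes := pvPrefixes marks
  String.ofList ((prefixes.reverse.foldl (· ++ ·) []) ++ escaped_text.toList
             ++ List.replicate prefixes.length '}')

-- ===== PRECONDITION & SPEC =====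
def Spec_wrap_with_marks_py (escaped_text : String) (marks : List String) (out : String) : Prop := out = wrap_with_marks_py_alt escaped_text marks
instance (escaped_text : String) (marks : List String) (out : String) : Decidable (Spec_wrap_with_marks_py escaped_text marks out) := by unfold Spec_wrap_with_marks_py; infer_instance

-- ===== CLAIM (what is proved, stated in full; the proofs are below) =====
def Claim_equal_wrap_with_marks_py : Prop := ∀ (escaped_text : String) (marks : List String), Dom_wrap_with_marks_py escaped_text marks → Spec_wrap_with_marks_py escaped_text marks (wrap_with_marks_py escaped_text marks)

-- ===== LEMMAS AND PROOFS =====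

-- one step of A's loop, expressed through B's table lookup
lemma pvStepA_eq (wrapped : List Char) (mark : String) :
    pvStepA wrapped mark =
      match (pvMarkCmds.lookup mark).map (fun c => c ++ "{".toList) with
      | some p => p ++ wrapped ++ ['}']
      | none => wrapped := by
  unfold pvStepA
  split_ifs with h1 h2 h3 h4 h5 h6 h7 h8
  · simp_all [pvMarkCmds]
  · simp_all [pvMarkCmds, List.lookup]
  · simp_all [pvMarkCmds, List.lookup]
  · simp_all [pvMarkCmds, List.lookup]
  · simp_all [pvMarkCmds, List.lookup]
  · simp_all [pvMarkCmds, List.lookup]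
  · simp_all [pvMarkCmds, List.lookup]
  · simp_all [pvMarkCmds, List.lookup]
  · simp [show List.lookup mark pvMarkCmds = none from by
            simp [pvMarkCmds, h1, h2, h3, h4, h7, h8]]

-- A's whole fold equals B's join-reversed/append/close-braces assembly
lemma pvFold_eq (marks : List String) (w : List Char) :
    marks.foldl pvStepA w =
      (pvPrefixes marks).reverse.foldl (· ++ ·) [] ++ w
        ++ List.replicate (pvPrefixes marks).length '}' := by
  induction marks generalizing w with
  | nil => simp [pvPrefixes]
  | cons m rest ih =>
    have hstep := pvStepA_eq w m
    cases h : pvMarkCmds.lookup m with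
    | none =>
      rw [h] at hstep
      simp only [Option.map_none] at hstep
      have hpre : pvPrefixes (m :: rest) = pvPrefixes rest := by
        simp [pvPrefixes, h]
      simp only [List.foldl_cons, hstep, ih, hpre]
    | some c =>
      rw [h] at hstep
      simp only [Option.map_some] at hstep
      have hpre : pvPrefixes (m :: rest) = (c ++ "{".toList) :: pvPrefixes rest := by
        simp [pvPrefixes, h]
      simp only [List.foldl_cons, hstep, ih, hpre, List.reverse_cons,
        List.foldl_append, List.foldl_nil, List.length_cons, List.replicate_succ']
      simp only [List.append_assoc, List.singleton_append]
      rw [← List.replicate_succ, List.replicate_succ']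

-- ===== VERDICT (by name: the statement is the Claim_ definition above) =====
theorem wrap_with_marks_py_spec : Claim_equal_wrap_with_marks_py := by
  intro escaped_text marks _
  unfold Spec_wrap_with_marks_py wrap_with_marks_py wrap_with_marks_py_alt
  split_ifs with h
  · subst h
    simp [pvPrefixes, String.ofList_toList]
  · rw [pvFold_eq]
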